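-- pv_equiv track=rewrite | github.com/ASSERT-KTH/Mokav | experiments/pynguin/c4b/return-lst/generated_tests/src_528/7/src_528.py | func
-- ===== SOURCE A (Python) =====
-- def func(*args):
-- 	ret_values = []
--
-- 	n = int(args[0])
-- 	r = 1
-- 	while ((r * 5) < n):
-- 	    n -= (r * 5)
-- 	    r *= 2
-- 	names = ('Sheldon', 'Leonard', 'Penny', 'Rajesh', 'Howard')
-- 	ret_values.append(names[int(((n - 1) / r))])
--
-- 	return ret_values
-- ===== SOURCE B (Python) =====
-- def func(*args):
--     # Closed form: instead of looping "subtract 5*r, double r", compute the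
--     # final r directly from m = ceil(N/5) via bit_length, then the remaining n.
--     N = int(args[0])
--     m = (N + 4) // 5
--     r = 1 << (m.bit_length() - 1) if m >= 1 else 1
--     n = N - 5 * (r - 1)
--     names = ('Sheldon', 'Leonard', 'Penny', 'Rajesh', 'Howard')
--     return [names[int((n - 1) / r)]]
-- ===== Notes on version B (the rewrite author's own statement) =====
-- stated objective: alternative
-- what changed: Replaces A's geometric-subtraction while loop (subtract 5*r, double r) with a closed form: m = ceil(N/5), final r = 2**(m.bit_length()-1) for m >= 1 else 1, remaining n = N - 5*(r-1); the same selection expression then picks the name.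
import Mathlib
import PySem

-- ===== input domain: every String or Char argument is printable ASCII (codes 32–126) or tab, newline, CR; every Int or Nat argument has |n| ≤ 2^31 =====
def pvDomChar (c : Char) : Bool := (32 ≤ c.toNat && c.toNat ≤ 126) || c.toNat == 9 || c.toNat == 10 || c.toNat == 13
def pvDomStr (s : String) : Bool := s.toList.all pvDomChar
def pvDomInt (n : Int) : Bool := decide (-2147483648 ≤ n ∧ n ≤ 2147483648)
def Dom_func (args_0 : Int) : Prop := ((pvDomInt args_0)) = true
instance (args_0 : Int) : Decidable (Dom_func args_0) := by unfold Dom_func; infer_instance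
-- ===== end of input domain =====

-- B replaces A's geometric-subtraction loop by a bit-length closed form: a different algorithm of similar (tiny) cost.


-- ===== PORT A =====
-- A's while loop: subtract r*5 from n, double r, while r*5 < n.
-- The '0 < r' conjunct only makes the recursion total; A always calls it with r = 1 > 0.
def funcLoopA (n r : Int) : Int × Int :=
  if 0 < r ∧ r * 5 < n then funcLoopA (n - r * 5) (r * 2) else (n, r)
  termination_by n.toNat
  decreasing_by omega

-- int((n-1)/r): Python float truncation; on Dom (|n| ≤ 2^31) the loop leaves either
-- r = 1 (division exact) or 0 ≤ n-1 < 5*r with r ≤ 2^30 (quotient correctly rounded,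
-- never across an integer), so it equals floor division exactly.
def func (args_0 : Int) : List String :=
  let p := funcLoopA args_0 1
  let names : List String := ["Sheldon", "Leonard", "Penny", "Rajesh", "Howard"]
  match PySem.List.pyGet? names (PySem.Int.floordiv (p.1 - 1) p.2) with
  | some s => [s]
  | none => []      -- IndexError in Python; excluded by Pre_func

-- ===== PORT B =====
-- m.bit_length() = PySem.Int.bitLength m; 1 << k = 2^k; same float-truncation note as in A's port.
def func_alt (args_0 : Int) : List String :=
  let m := PySem.Int.floordiv (args_0 + 4) 5
  let r : Int := if 1 ≤ m then (2 : Int) ^ (PySem.Int.bitLength m - 1) else 1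
  let n := args_0 - 5 * (r - 1)
  let names : List String := ["Sheldon", "Leonard", "Penny", "Rajesh", "Howard"]
  match PySem.List.pyGet? names (PySem.Int.floordiv (n - 1) r) with
  | some s => [s]
  | none => []

-- ===== PRECONDITION & SPEC =====
-- Pre_ excludes exactly the inputs where A raises IndexError (args_0 ≤ -5: the
-- loop is skipped and names[args_0 - 1] is out of range); B raises there too.
def Pre_func (args_0 : Int) : Prop := -4 ≤ args_0
instance (args_0 : Int) : Decidable (Pre_func args_0) := by unfold Pre_func; infer_instance
def pvWitness_func : Int := (7 : Int)
def Spec_func (args_0 : Int) (out : List String) : Prop := out = func_alt args_0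
instance (args_0 : Int) (out : List String) : Decidable (Spec_func args_0 out) := by unfold Spec_func; infer_instance

-- ===== CLAIM (what is proved, stated in full; the proofs are below) =====
def Claim_equal_func : Prop := ∀ (args_0 : Int), Dom_func args_0 → Pre_func args_0 → Spec_func args_0 (func args_0)

-- ===== LEMMAS AND PROOFS =====

-- the final r, as a function of m = ceil(remaining work / 5r)
def Rof (m : Int) : Int := if 1 ≤ m then (2 : Int) ^ (PySem.Int.bitLength m - 1) else 1

lemma bitLength_pos (m : Int) (hm : 1 ≤ m) : 1 ≤ PySem.Int.bitLength m := by
  rw [PySem.Int.bitLength_of_pos (by omega)]; omega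

lemma Rof_rec (m : Int) (hm : 2 ≤ m) : Rof m = 2 * Rof (PySem.Int.floordiv m 2) := by
  have h2 : PySem.Int.floordiv m 2 = m / 2 := PySem.Int.floordiv_eq_ediv_of_pos (by omega)
  have hq : 1 ≤ m / 2 := by omega
  have hbl : 1 ≤ PySem.Int.bitLength (m / 2) := bitLength_pos _ hq
  rw [Rof, Rof, PySem.Int.bitLength_of_pos (by omega : (0:Int) < m), h2,
      if_pos (by omega : (1:Int) ≤ m), if_pos hq]
  rw [show PySem.Int.bitLength (m / 2) + 1 - 1 = (PySem.Int.bitLength (m / 2) - 1) + 1 by omega]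
  ring

-- the loop when it stops immediately (n ≤ 5r): m ≤ 1 and Rof m = 1
lemma loop_stop (n r : Int) (hr : 0 < r) (hn : n ≤ r * 5) :
    funcLoopA n r =
      (n - 5 * r * (Rof (PySem.Int.floordiv (n + 5 * r - 1) (5 * r)) - 1),
       r * Rof (PySem.Int.floordiv (n + 5 * r - 1) (5 * r))) := by
  have hm := (PySem.Int.floordiv_eq_iff_of_pos (by omega : (0:Int) < 5 * r)).mp
    (rfl : PySem.Int.floordiv (n + 5 * r - 1) (5 * r) = _)
  set m := PySem.Int.floordiv (n + 5 * r - 1) (5 * r) with hmdef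
  have hm1 : m ≤ 1 := by
    by_contra h
    have h2 : (2:Int) ≤ m := by omega
    have hx : 2 * (5 * r) ≤ m * (5 * r) := mul_le_mul_of_nonneg_right h2 (by omega)
    linarith [hm.1]
  have hR : Rof m = 1 := by
    rw [Rof]; split
    · have h1 : m = 1 := by omega
      rw [h1]; decide
    · rfl
  rw [funcLoopA, if_neg (by omega : ¬ (0 < r ∧ r * 5 < n)), hR]
  simp only [Prod.mk.injEq]; constructor <;> ring

lemma loop_closed : ∀ (k : Nat) (n r : Int), n.toNat ≤ k → 0 < r →
    funcLoopA n r =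
      (n - 5 * r * (Rof (PySem.Int.floordiv (n + 5 * r - 1) (5 * r)) - 1),
       r * Rof (PySem.Int.floordiv (n + 5 * r - 1) (5 * r))) := by
  intro k
  induction k with
  | zero =>
    intro n r hk hr
    exact loop_stop n r hr (by omega)
  | succ k ih =>
    intro n r hk hr
    by_cases hlt : r * 5 < n
    · -- loop body runs once; m >= 2 and the tail has m' = m / 2
      have hm := (PySem.Int.floordiv_eq_iff_of_pos (by omega : (0:Int) < 5 * r)).mp
        (rfl : PySem.Int.floordiv (n + 5 * r - 1) (5 * r) = _)
      set m := PySem.Int.floordiv (n + 5 * r - 1) (5 * r) with hmdef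
      have hm2 : 2 ≤ m := by
        by_contra h
        have h1 : m ≤ 1 := by omega
        have hx : (m + 1) * (5 * r) ≤ 2 * (5 * r) := mul_le_mul_of_nonneg_right (by omega) (by omega)
        linarith [hm.2]
      obtain ⟨q, hqdef, hqcase⟩ : ∃ q, m / 2 = q ∧ (m = 2 * q ∨ m = 2 * q + 1) :=
        ⟨m / 2, rfl, by omega⟩
      have htail : PySem.Int.floordiv ((n - r * 5) + 5 * (r * 2) - 1) (5 * (r * 2)) = q := by
        apply (PySem.Int.floordiv_eq_iff_of_pos (by omega : (0:Int) < 5 * (r * 2))).mpr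
        constructor
        · rcases hqcase with h | h <;> nlinarith [hm.1, hm.2]
        · rcases hqcase with h | h <;> nlinarith [hm.1, hm.2]
      have hrec : funcLoopA n r = funcLoopA (n - r * 5) (r * 2) := by
        rw [funcLoopA, if_pos ⟨hr, hlt⟩]
      have hfd2 : PySem.Int.floordiv m 2 = q := by
        rw [PySem.Int.floordiv_eq_ediv_of_pos (by omega : (0:Int) < 2), hqdef]
      have hRm : Rof m = 2 * Rof q := by rw [Rof_rec m hm2, hfd2]
      rw [hrec, ih (n - r * 5) (r * 2) (by omega) (by omega), htail, hRm]
      simp only [Prod.mk.injEq]; constructor <;> ring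
    · exact loop_stop n r hr (by omega)

lemma func_eq_alt (args_0 : Int) : func args_0 = func_alt args_0 := by
  have hL := loop_closed args_0.toNat args_0 1 (le_refl _) one_pos
  rw [show args_0 + 5 * 1 - 1 = args_0 + 4 by ring] at hL
  rw [func, func_alt, hL]
  simp only [Rof]
  norm_num

-- ===== VERDICT (by name: the statement is the Claim_ definition above) =====
theorem func_spec : Claim_equal_func := by
  intro args_0 _ _
  unfold Spec_func
  exact func_eq_alt args_0
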